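-- pv_equiv track=rewrite | github.com/thealper2/codewars-solutions | 7-kyu/simple_fun_177_rank_of_element.py | rank_of_element
-- ===== SOURCE A (Python) =====
-- def rank_of_element(arr, idx):
--     n = len(arr)
--     rank = 0
--
--     for i in range(n):
--         if i < idx and arr[i] <= arr[idx]:
--             rank += 1
--         elif i == idx:
--             continue
--         elif i > idx and arr[i] < arr[idx]:
--             rank += 1
--
--     return rank
-- ===== SOURCE B (Python) =====
-- def rank_of_element(arr, idx):
--     pivot = arr[idx]
--     less = sum(1 for x in arr if x < pivot)
--     ties = sum(1 for i in range(idx) if arr[i] == pivot)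
--     return less + ties
-- ===== Notes on version B (the rewrite author's own statement) =====
-- stated objective: simpler
-- what changed: Replaces A's single position-aware loop with three-way i<idx/i==idx/i>idx branching by two plain counts: elements strictly below the pivot anywhere, plus elements equal to the pivot before idx.
-- outside the precondition, e.g. on rank_of_element([], 0): A returns 0, B raises IndexError
import Mathlib
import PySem

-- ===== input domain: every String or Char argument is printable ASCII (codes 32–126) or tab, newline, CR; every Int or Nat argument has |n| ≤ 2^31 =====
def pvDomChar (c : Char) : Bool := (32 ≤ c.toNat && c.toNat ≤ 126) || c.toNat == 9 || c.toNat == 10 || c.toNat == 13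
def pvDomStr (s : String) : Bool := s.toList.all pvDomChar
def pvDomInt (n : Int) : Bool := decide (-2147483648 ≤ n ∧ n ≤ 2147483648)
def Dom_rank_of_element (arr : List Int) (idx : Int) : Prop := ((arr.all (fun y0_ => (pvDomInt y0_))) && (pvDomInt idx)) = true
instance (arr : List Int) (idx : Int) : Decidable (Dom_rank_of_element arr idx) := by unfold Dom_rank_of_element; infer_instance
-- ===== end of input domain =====

-- B replaces A's position-aware branching pass by two plain counts (strictly-below anywhere + equal-before-idx): simpler, same O(n) cost.

-- ===== PORT A =====
def rank_of_element (arr : List Int) (idx : Int) : Int :=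
  let n : Int := arr.length
  (PySem.List.pyRange 0 n 1).foldl (fun rank i =>
    if i < idx ∧ PySem.List.pyGetD arr i 0 ≤ PySem.List.pyGetD arr idx 0 then rank + 1
    else if i = idx then rank
    else if idx < i ∧ PySem.List.pyGetD arr i 0 < PySem.List.pyGetD arr idx 0 then rank + 1
    else rank) 0

-- ===== PORT B =====
def rank_of_element_alt (arr : List Int) (idx : Int) : Int :=
  let pivot := PySem.List.pyGetD arr idx 0
  let less := arr.foldl (fun a x => if x < pivot then a + 1 else a) 0
  let ties := (PySem.List.pyRange 0 idx 1).foldl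
    (fun a i => if PySem.List.pyGetD arr i 0 = pivot then a + 1 else a) 0
  less + ties

-- ===== PRECONDITION & SPEC =====
-- Pre_ excludes exactly the inputs where arr[idx] is an IndexError in B: idx out of range
-- (where A itself raises unless arr is empty) and the empty list, on which A returns 0 only
-- because its loop body never touches arr[idx] while the natural B raises there.
def Pre_rank_of_element (arr : List Int) (idx : Int) : Prop :=
  PySem.Raise.InRange arr.length idx
instance (arr : List Int) (idx : Int) : Decidable (Pre_rank_of_element arr idx) := by
  unfold Pre_rank_of_element; infer_instance

def pvWitness_rank_of_element : List Int × Int := ([3, 1, 2, 1], 1)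

def Spec_rank_of_element (arr : List Int) (idx : Int) (out : Int) : Prop := out = rank_of_element_alt arr idx
instance (arr : List Int) (idx : Int) (out : Int) : Decidable (Spec_rank_of_element arr idx out) := by unfold Spec_rank_of_element; infer_instance

-- ===== CLAIM (what is proved, stated in full; the proofs are below) =====
def Claim_equal_rank_of_element : Prop := ∀ (arr : List Int) (idx : Int), Dom_rank_of_element arr idx → Pre_rank_of_element arr idx → Spec_rank_of_element arr idx (rank_of_element arr idx)

-- ===== LEMMAS AND PROOFS =====

-- counting foldl = countP
theorem pv_foldl_count {α : Type} (L : List α) (p : α → Prop) [DecidablePred p] (acc : Int) :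
    L.foldl (fun a x => if p x then a + 1 else a) acc = acc + L.countP (fun x => decide (p x)) := by
  induction L generalizing acc with
  | nil => simp
  | cons y ys ih =>
      by_cases h : p y <;> simp [h, ih]
      ring

-- splitting a count along a disjoint disjunction
theorem pv_countP_split {α : Type} (L : List α) (f g h : α → Bool)
    (hpt : ∀ x ∈ L, f x = (g x || h x) ∧ ¬(g x = true ∧ h x = true)) :
    L.countP f = L.countP g + L.countP h := by
  induction L with
  | nil => simp
  | cons y ys ih =>
      have hy := hpt y (by simp)
      have ih' := ih (fun x hx => hpt x (by simp [hx]))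
      simp only [List.countP_cons, ih', hy.1]
      cases hg : g y <;> cases hh : h y <;> simp_all <;> omega

-- main counting identity
theorem pv_main (arr : List Int) (idx : Int)
    (hlo : -(arr.length : Int) ≤ idx) (hhi : idx < (arr.length : Int)) :
    rank_of_element arr idx = rank_of_element_alt arr idx := by
  show (PySem.List.pyRange 0 (arr.length : Int) 1).foldl _ 0
      = arr.foldl _ 0 + (PySem.List.pyRange 0 idx 1).foldl _ 0
  set p : Int := PySem.List.pyGetD arr idx 0 with hp
  have body_eq : (fun (rank : Int) (i : Int) =>
      if i < idx ∧ PySem.List.pyGetD arr i 0 ≤ p then rank + 1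
      else if i = idx then rank
      else if idx < i ∧ PySem.List.pyGetD arr i 0 < p then rank + 1 else rank)
    = (fun (rank : Int) (i : Int) =>
      if (i < idx ∧ PySem.List.pyGetD arr i 0 ≤ p) ∨
         (¬ i = idx ∧ idx < i ∧ PySem.List.pyGetD arr i 0 < p) then rank + 1 else rank) := by
    funext rank i
    generalize PySem.List.pyGetD arr i 0 = v
    split_ifs <;> omega
  rw [body_eq]
  rw [pv_foldl_count ((PySem.List.pyRange 0 (arr.length : Int) 1))
        (fun i => (i < idx ∧ PySem.List.pyGetD arr i 0 ≤ p) ∨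
                  (¬ i = idx ∧ idx < i ∧ PySem.List.pyGetD arr i 0 < p))]
  · rw [pv_foldl_count arr (fun x => x < p)]
    rw [pv_foldl_count (PySem.List.pyRange 0 idx 1) (fun i => PySem.List.pyGetD arr i 0 = p)]
    -- reduce to a Nat countP identity
    have key : (PySem.List.pyRange 0 (arr.length : Int) 1).countP
          (fun i => decide ((i < idx ∧ PySem.List.pyGetD arr i 0 ≤ p) ∨
                  (¬ i = idx ∧ idx < i ∧ PySem.List.pyGetD arr i 0 < p)))
        = arr.countP (fun x => decide (x < p)) +
          (PySem.List.pyRange 0 idx 1).countP (fun i => decide (PySem.List.pyGetD arr i 0 = p)) := by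
      -- step 1: split the A-predicate pointwise into "less" and "tie before idx"
      have split := pv_countP_split (PySem.List.pyRange 0 (arr.length : Int) 1)
        (fun i => decide ((i < idx ∧ PySem.List.pyGetD arr i 0 ≤ p) ∨
                  (¬ i = idx ∧ idx < i ∧ PySem.List.pyGetD arr i 0 < p)))
        (fun i => decide (PySem.List.pyGetD arr i 0 < p))
        (fun i => decide (i < idx ∧ PySem.List.pyGetD arr i 0 = p))
        (by
          intro i hi
          rw [PySem.List.mem_pyRange_one] at hi
          constructor
          · rw [← Bool.decide_or, decide_eq_decide]
            by_cases hip : i = idx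
            · subst hip; rw [← hp]; omega
            · generalize PySem.List.pyGetD arr i 0 = v; omega
          · simp only [decide_eq_true_eq]
            by_cases hip : i = idx
            · subst hip; rw [← hp]; omega
            · generalize PySem.List.pyGetD arr i 0 = v; omega)
      rw [split]
      congr 1
      · -- "less" count over indices = count over elements
        have := PySem.List.map_pyGetD_pyRange_zero' arr (0 : Int)
        conv_rhs => rw [← this]
        rw [List.countP_map]
        rfl
      · -- tie count: restrict the index range to [0, idx)
        by_cases hpos : 0 ≤ idx
        · rw [PySem.List.pyRange_one_append 0 idx (arr.length : Int) hpos (le_of_lt hhi),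
              List.countP_append]
          have h2 : (PySem.List.pyRange idx (arr.length : Int) 1).countP
              (fun i => decide (i < idx ∧ PySem.List.pyGetD arr i 0 = p)) = 0 := by
            rw [List.countP_eq_zero]
            intro i hi
            rw [PySem.List.mem_pyRange_one] at hi
            simp only [decide_eq_true_eq, not_and]
            intro h; omega
          rw [h2, Nat.add_zero]
          apply List.countP_congr
          intro i hi
          rw [PySem.List.mem_pyRange_one] at hi
          simp [hi.2]
        · have e1 : PySem.List.pyRange 0 idx 1 = [] :=
            PySem.List.pyRange_one_eq_nil (by omega)
          rw [e1]
          rw [List.countP_eq_zero.mpr]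
          · simp
          · intro i hi
            rw [PySem.List.mem_pyRange_one] at hi
            simp only [decide_eq_true_eq, not_and]
            intro h; omega
    rw [key]
    push_cast
    ring

-- ===== VERDICT (by name: the statement is the Claim_ definition above) =====
theorem rank_of_element_spec : Claim_equal_rank_of_element := by
  intro arr idx _ hpre
  unfold Spec_rank_of_element
  unfold Pre_rank_of_element PySem.Raise.InRange at hpre
  exact pv_main arr idx hpre.1 hpre.2
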